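-- pv_equiv track=rewrite | github.com/miliar/Code_Jam_Webscraper | solutions_python/Problem_138/609.py | deceitful
-- ===== SOURCE A (Python) =====
-- def deceitful(naomi, ken):
--     naomi_score = 0
--     while len(ken) > 0:
--         ken_block = ken[0]
--         removed = False
--         for i in range(len(naomi)):
--             if naomi[i] > ken_block:
--                 naomi = naomi[0:i] + naomi[i+1:]
--                 ken = ken[1:]
--                 removed = True
--                 naomi_score += 1
--                 break
--         if not removed:
--             naomi = naomi[1:]
--             ken = ken[:len(ken)-1]
--     return naomi_score
-- ===== SOURCE B (Python) =====
-- def _top(t):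
--     return t[1]
--
--
-- def _omax(a, b):
--     if a is None:
--         return b
--     if b is None:
--         return a
--     return a if a >= b else b
--
--
-- def _build(vals):
--     # max-segment tree over vals: ('leaf', v) | ('node', mx, left, right)
--     if len(vals) == 1:
--         return ('leaf', vals[0])
--     mid = len(vals) // 2
--     l = _build(vals[:mid])
--     r = _build(vals[mid:])
--     return ('node', _omax(_top(l), _top(r)), l, r)
--
--
-- def _pop_gt(t, k):
--     # delete the leftmost live value > k; returns (new tree, found?).
--     # The subtree-max prune makes each call O(log n).
--     if t[0] == 'leaf':
--         v = t[1]
--         if v is not None and v > k: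
--             return ('leaf', None), True
--         return t, False
--     mx = t[1]
--     if mx is None or mx <= k:
--         return t, False
--     l, r = t[2], t[3]
--     nl, found = _pop_gt(l, k)
--     if found:
--         return ('node', _omax(_top(nl), _top(r)), nl, r), True
--     nr, found = _pop_gt(r, k)
--     if found:
--         return ('node', _omax(_top(l), _top(nr)), l, nr), True
--     return t, False
--
--
-- def deceitful(naomi, ken):
--     # Each round: Naomi beats ken's front with her leftmost larger value.
--     # After the first round with no such value, the front of ken never
--     # advances again, so no further round scores: stop there.
--     if not naomi:
--         return 0
--     tree = _build(naomi)
--     score = 0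
--     for k in ken:
--         tree, found = _pop_gt(tree, k)
--         if not found:
--             break
--         score += 1
--     return score
-- ===== Notes on version B (the rewrite author's own statement) =====
-- stated objective: faster
-- what changed: B replaces A's repeated linear scans over list slices by a max-segment tree over naomi with a combined leftmost-value-greater-than-k query and point delete per round, and stops at the first scoreless round (after one loss ken's front never advances, so no later round scores).
import Mathlib
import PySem

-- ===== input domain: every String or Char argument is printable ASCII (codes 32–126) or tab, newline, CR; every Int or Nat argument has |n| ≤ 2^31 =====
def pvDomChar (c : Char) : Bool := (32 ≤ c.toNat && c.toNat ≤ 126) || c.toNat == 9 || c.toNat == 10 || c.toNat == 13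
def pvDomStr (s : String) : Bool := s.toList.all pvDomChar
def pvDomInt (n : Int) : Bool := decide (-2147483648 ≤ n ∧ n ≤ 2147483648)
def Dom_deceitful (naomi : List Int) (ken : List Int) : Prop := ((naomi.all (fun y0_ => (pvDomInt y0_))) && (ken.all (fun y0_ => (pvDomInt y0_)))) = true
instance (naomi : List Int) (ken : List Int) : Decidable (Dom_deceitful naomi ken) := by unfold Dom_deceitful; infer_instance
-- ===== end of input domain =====

-- B replaces A's repeated linear scans over list slices by a max-segment tree over naomi
-- (combined leftmost-greater query + point delete per round) and stops at the first
-- scoreless round; objective: faster (asymptotic, in a timing run).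


-- ===== PORT A =====
-- A's inner 'for i in range(len(naomi)): if naomi[i] > ken_block: … break' — the linear scan
-- for the first index whose element exceeds k (none = fell through without a break).
def aFirstGtIdx (naomi : List Int) (k : Int) : Option Nat :=
  match naomi with
  | [] => none
  | v :: vs => if v > k then some 0 else (aFirstGtIdx vs k).map (· + 1)

-- A's while loop over the shrinking (naomi, ken) state.  The Python slices are exact here:
-- naomi[0:i] + naomi[i+1:] with 0 ≤ i < len(naomi) is take i ++ drop (i+1); ken[1:] of a
-- non-empty ken is its tail; naomi[1:] is naomi.tail; ken[:len(ken)-1] of a non-empty ken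
-- is ken.dropLast (all indices non-negative and in range).
def deceitfulGo (naomi : List Int) (ken : List Int) (score : Int) : Int :=
  match ken with
  | [] => score
  | kb :: krest =>
    match aFirstGtIdx naomi kb with
    | some i => deceitfulGo (naomi.take i ++ naomi.drop (i + 1)) krest (score + 1)
    | none => deceitfulGo naomi.tail (kb :: krest).dropLast score
termination_by ken.length
decreasing_by
  · simp
  · simp

def deceitful (naomi : List Int) (ken : List Int) : Int :=
  deceitfulGo naomi ken 0

-- ===== PORT B =====
-- B's segment tree: ('leaf', v) | ('node', mx, left, right); a deleted leaf holds None.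
inductive STree where
  | leaf : Option Int → STree
  | node : Option Int → STree → STree → STree
deriving DecidableEq, Repr

-- _top(t) = t[1]
def stTop : STree → Option Int
  | .leaf v => v
  | .node m _ _ => m

-- _omax: max of two optional values, None = minus infinity
def omaxB (a b : Option Int) : Option Int :=
  match a, b with
  | none, b => b
  | some x, none => some x
  | some x, some y => if x ≥ y then some x else some y

-- _build(vals): split at len//2 and recurse (the [] case is unreachable from
-- deceitful_alt, which guards against empty naomi exactly as Source B does).
def stBuild : List Int → STree
  | [] => .leaf none
  | [v] => .leaf (some v)
  | v :: w :: rest =>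
    let vals := v :: w :: rest
    let mid := vals.length / 2
    let l := stBuild (vals.take mid)
    let r := stBuild (vals.drop mid)
    .node (omaxB (stTop l) (stTop r)) l r
termination_by vals => vals.length
decreasing_by
  · simp; omega
  · simp; omega

-- _pop_gt(t, k): delete the leftmost live value > k; (new tree, found?).
-- 'if mx is None or mx <= k: return t, False' is the none branch + the x ≤ k branch.
def stPopGt : STree → Int → STree × Bool
  | .leaf v, k =>
    match v with
    | some x => if x > k then (.leaf none, true) else (.leaf (some x), false)
    | none => (.leaf none, false)
  | .node none l r, _ => (.node none l r, false)
  | .node (some x) l r, k =>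
    if x ≤ k then (.node (some x) l r, false)
    else
      let p := stPopGt l k
      if p.2 then (.node (omaxB (stTop p.1) (stTop r)) p.1 r, true)
      else
        let q := stPopGt r k
        if q.2 then (.node (omaxB (stTop l) (stTop q.1)) l q.1, true)
        else (.node (some x) l r, false)

-- B's 'for k in ken: … if not found: break'
def bMain : STree → List Int → Int → Int
  | _, [], score => score
  | t, k :: rest, score =>
    let p := stPopGt t k
    if p.2 then bMain p.1 rest (score + 1) else score

def deceitful_alt (naomi : List Int) (ken : List Int) : Int :=
  match naomi with
  | [] => 0
  | _ :: _ => bMain (stBuild naomi) ken 0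

-- ===== PRECONDITION & SPEC =====
def Spec_deceitful (naomi : List Int) (ken : List Int) (out : Int) : Prop := out = deceitful_alt naomi ken
instance (naomi : List Int) (ken : List Int) (out : Int) : Decidable (Spec_deceitful naomi ken out) := by unfold Spec_deceitful; infer_instance

-- ===== CLAIM (what is proved, stated in full; the proofs are below) =====
def Claim_equal_deceitful : Prop := ∀ (naomi : List Int) (ken : List Int), Dom_deceitful naomi ken → Spec_deceitful naomi ken (deceitful naomi ken)

-- ===== LEMMAS AND PROOFS =====

-- intermediate spec: remove the first element > k from a plain list (none = no such element)
def remFirstGt (remaining : List Int) (k : Int) : Option (List Int) :=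
  match remaining with
  | [] => none
  | v :: vs => if v > k then some vs else (remFirstGt vs k).map (v :: ·)

-- intermediate spec: forward pass over ken, stop at the first k nothing beats
def specGo (remaining : List Int) (ken : List Int) (score : Int) : Int :=
  match ken with
  | [] => score
  | k :: rest =>
    match remFirstGt remaining k with
    | some rem => specGo rem rest (score + 1)
    | none => score

-- the mask view of the tree: leaves left to right (none = deleted)
def stLeaves : STree → List (Option Int)
  | .leaf v => [v]
  | .node _ l r => stLeaves l ++ stLeaves r

-- well-formedness: every node caches the omax of its children's tops
def stWF : STree → Prop
  | .leaf _ => True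
  | .node m l r => m = omaxB (stTop l) (stTop r) ∧ stWF l ∧ stWF r

-- first some-value > k in a mask, replaced by none
def maskRemFirstGt (L : List (Option Int)) (k : Int) : Option (List (Option Int)) :=
  match L with
  | [] => none
  | none :: xs => (maskRemFirstGt xs k).map (none :: ·)
  | some v :: xs => if v > k then some (none :: xs) else (maskRemFirstGt xs k).map (some v :: ·)

-- drop the deleted entries of a mask
def compact : List (Option Int) → List Int
  | [] => []
  | none :: xs => compact xs
  | some v :: xs => v :: compact xs

lemma omaxB_none_right (a : Option Int) : omaxB a none = a := by
  cases a <;> simp [omaxB]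

lemma omaxB_assoc (a b c : Option Int) : omaxB (omaxB a b) c = omaxB a (omaxB b c) := by
  cases a <;> cases b <;> cases c <;> simp [omaxB] <;> split_ifs <;> first | rfl | (simp [omaxB]; try split_ifs) <;> first | rfl | omega

def maskMax (L : List (Option Int)) : Option Int := L.foldr omaxB none

lemma maskMax_append (a b : List (Option Int)) : maskMax (a ++ b) = omaxB (maskMax a) (maskMax b) := by
  induction a with
  | nil => simp [maskMax, omaxB]
  | cons x xs ih => simp only [maskMax, List.cons_append, List.foldr] at ih ⊢; rw [ih, omaxB_assoc]

-- with wf, the cached top is the max over the leaves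
lemma stTop_eq_maskMax (t : STree) (h : stWF t) : stTop t = maskMax (stLeaves t) := by
  induction t with
  | leaf v => simp [stTop, stLeaves, maskMax, List.foldr, omaxB_none_right]
  | node m l r ihl ihr =>
    obtain ⟨hm, hl, hr⟩ := h
    show m = _
    rw [hm, ihl hl, ihr hr]
    simp [stLeaves, maskMax_append]

-- every live value in a mask is ≤ its max
lemma le_maskMax (L : List (Option Int)) (v : Int) (hv : some v ∈ L) :
    ∃ m, maskMax L = some m ∧ v ≤ m := by
  induction L with
  | nil => simp at hv
  | cons x xs ih =>
    simp only [List.mem_cons] at hv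
    simp only [maskMax, List.foldr]
    rcases hv with rfl | hv
    · cases h : List.foldr omaxB none xs with
      | none => exact ⟨v, by simp [omaxB], le_refl v⟩
      | some m =>
        by_cases hvm : v ≥ m
        · exact ⟨v, by simp [omaxB, hvm], le_refl v⟩
        · exact ⟨m, by simp [omaxB, hvm], by omega⟩
    · obtain ⟨m, hm, hle⟩ := ih hv
      simp only [maskMax] at hm
      rw [hm]
      cases x with
      | none => exact ⟨m, by simp [omaxB], hle⟩
      | some y =>
        by_cases hy : y ≥ m
        · exact ⟨y, by simp [omaxB, hy], by omega⟩
        · exact ⟨m, by simp [omaxB, hy], hle⟩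

lemma maskRem_eq_none_iff (L : List (Option Int)) (k : Int) :
    maskRemFirstGt L k = none ↔ ∀ v : Int, some v ∈ L → v ≤ k := by
  induction L with
  | nil => simp [maskRemFirstGt]
  | cons x xs ih =>
    cases x with
    | none => simp [maskRemFirstGt, ih]
    | some v =>
      by_cases h : v > k
      · simp only [maskRemFirstGt, if_pos h]
        constructor
        · intro habs; exact absurd habs (by simp)
        · intro hall
          exact absurd (hall v (by simp)) (by omega)
      · simp only [maskRemFirstGt, if_neg h, Option.map_eq_none_iff, ih]
        constructor
        · intro hall w hw
          simp only [List.mem_cons] at hw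
          rcases hw with hw | hw
          · injection hw with hw; omega
          · exact hall w hw
        · intro hall w hw
          exact hall w (List.mem_cons_of_mem _ hw)

lemma maskRem_append_left (a b : List (Option Int)) (k : Int) (a' : List (Option Int))
    (h : maskRemFirstGt a k = some a') : maskRemFirstGt (a ++ b) k = some (a' ++ b) := by
  induction a generalizing a' with
  | nil => simp [maskRemFirstGt] at h
  | cons x xs ih =>
    cases x with
    | none =>
      simp only [maskRemFirstGt, List.cons_append, Option.map_eq_some_iff] at h ⊢
      obtain ⟨y, hy, rfl⟩ := h
      exact ⟨y ++ b, ih _ hy, rfl⟩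
    | some v =>
      by_cases hv : v > k
      · simp only [maskRemFirstGt, if_pos hv, Option.some_inj] at h
        rw [← h]
        simp [maskRemFirstGt, hv]
      · simp only [maskRemFirstGt, List.cons_append, if_neg hv, Option.map_eq_some_iff] at h ⊢
        obtain ⟨y, hy, rfl⟩ := h
        exact ⟨y ++ b, ih _ hy, rfl⟩

lemma maskRem_append_right (a b : List (Option Int)) (k : Int)
    (h : maskRemFirstGt a k = none) :
    maskRemFirstGt (a ++ b) k = (maskRemFirstGt b k).map (a ++ ·) := by
  induction a with
  | nil =>
    simp only [List.nil_append]
    cases maskRemFirstGt b k <;> simp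
  | cons x xs ih =>
    cases x with
    | none =>
      simp only [maskRemFirstGt, Option.map_eq_none_iff, List.cons_append] at h ⊢
      rw [ih h]
      cases maskRemFirstGt b k <;> simp
    | some v =>
      by_cases hv : v > k
      · simp [maskRemFirstGt, hv] at h
      · simp only [maskRemFirstGt, if_neg hv, Option.map_eq_none_iff, List.cons_append] at h ⊢
        rw [ih h]
        cases maskRemFirstGt b k <;> simp

-- the core segment-tree lemma: stPopGt realises maskRemFirstGt on the leaves and preserves wf
lemma stPopGt_spec (t : STree) (k : Int) (h : stWF t) :
    (maskRemFirstGt (stLeaves t) k = none ∧ stPopGt t k = (t, false)) ∨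
    (∃ L', maskRemFirstGt (stLeaves t) k = some L' ∧ (stPopGt t k).2 = true ∧
      stLeaves (stPopGt t k).1 = L' ∧ stWF (stPopGt t k).1) := by
  induction t with
  | leaf v =>
    cases v with
    | none => left; simp [maskRemFirstGt, stLeaves, stPopGt]
    | some x =>
      by_cases hx : x > k
      · right
        exact ⟨[none], by simp [stLeaves, maskRemFirstGt, hx], by simp [stPopGt, hx],
          by simp [stPopGt, hx, stLeaves], by simp [stPopGt, hx, stWF]⟩
      · left; simp [stLeaves, maskRemFirstGt, hx, stPopGt]
  | node m l r ihl ihr =>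
    obtain ⟨hm, hl, hr⟩ := h
    have htop : m = maskMax (stLeaves l ++ stLeaves r) := by
      rw [hm, maskMax_append, stTop_eq_maskMax l hl, stTop_eq_maskMax r hr]
    -- the prune case: cached max none or ≤ k ⇒ every live value ≤ k ⇒ mask removal fails
    have hallsmall : ∀ x : Int, m = some x → x ≤ k →
        maskRemFirstGt (stLeaves l ++ stLeaves r) k = none := by
      intro x hx hxk
      apply (maskRem_eq_none_iff _ k).mpr
      intro v hv
      obtain ⟨mm, hmm, hle⟩ := le_maskMax _ v hv
      rw [← htop, hx] at hmm
      injection hmm with hmm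
      omega
    cases hm2 : m with
    | none =>
      left
      rw [hm2] at htop
      refine ⟨(maskRem_eq_none_iff _ k).mpr ?_, by rw [stPopGt]⟩
      intro v hv
      simp only [stLeaves] at hv
      obtain ⟨mm, hmm, _⟩ := le_maskMax _ v hv
      rw [← htop] at hmm
      exact absurd hmm (by simp)
    | some x =>
      by_cases hxk : x ≤ k
      · left
        exact ⟨by simpa [stLeaves] using hallsmall x hm2 hxk, by simp [stPopGt, hxk, stLeaves]⟩
      · -- descend
        have hstep : stPopGt (.node (some x) l r) k =
            (let p := stPopGt l k
             if p.2 then (.node (omaxB (stTop p.1) (stTop r)) p.1 r, true)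
             else
               let q := stPopGt r k
               if q.2 then (.node (omaxB (stTop l) (stTop q.1)) l q.1, true)
               else (.node (some x) l r, false)) := by
          rw [stPopGt]
          simp [hxk]
        rcases ihl hl with ⟨hln, hleq⟩ | ⟨Ll, hLl, hf, hlv, hwf⟩
        · rcases ihr hr with ⟨hrn, hreq⟩ | ⟨Lr, hLr, hf2, hrv, hwf2⟩
          · left
            constructor
            · simp only [stLeaves]
              rw [maskRem_append_right _ _ _ hln, hrn]; rfl
            · rw [hstep]
              simp only [hleq, hreq]
              simp
          · right
            refine ⟨stLeaves l ++ Lr, ?_, ?_, ?_, ?_⟩ <;>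
              [skip;
               (rw [hstep]; simp only [hleq]; simp only [hf2]; simp);
               (rw [hstep]; simp only [hleq]; simp only [hf2]; simp [stLeaves, hrv]);
               (rw [hstep]; simp only [hleq]; simp only [hf2]; simp [stWF]; exact ⟨hl, hwf2⟩)]
            simp only [stLeaves]
            rw [maskRem_append_right _ _ _ hln, hLr]; rfl
        · right
          refine ⟨Ll ++ stLeaves r, ?_, ?_, ?_, ?_⟩
          · simp only [stLeaves]
            exact maskRem_append_left _ _ _ _ hLl
          · rw [hstep]; simp only [hf]; simp
          · rw [hstep]; simp only [hf]; simp [stLeaves, hlv]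
          · rw [hstep]; simp only [hf]; simp [stWF]; exact ⟨hwf, hr⟩

-- bridge: removal on the compacted list = removal on the mask
lemma remFirstGt_compact (L : List (Option Int)) (k : Int) :
    remFirstGt (compact L) k = (maskRemFirstGt L k).map compact := by
  induction L with
  | nil => simp [remFirstGt, maskRemFirstGt, compact]
  | cons x xs ih =>
    cases x with
    | none =>
      simp only [compact, maskRemFirstGt]
      rw [ih]
      cases maskRemFirstGt xs k <;> simp [compact]
    | some v =>
      by_cases hv : v > k
      · simp [remFirstGt, maskRemFirstGt, compact, hv]
      · simp only [compact, remFirstGt, maskRemFirstGt, if_neg hv]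
        rw [ih]
        cases maskRemFirstGt xs k <;> simp [compact]

lemma compact_map_some (vals : List Int) : compact (vals.map some) = vals := by
  induction vals with
  | nil => rfl
  | cons v vs ih => simp [compact, ih]

-- building the tree gives the all-live mask, well-formed
lemma stBuild_spec (n : Nat) : ∀ (vals : List Int), vals.length = n → vals ≠ [] →
    stLeaves (stBuild vals) = vals.map some ∧ stWF (stBuild vals) := by
  induction n using Nat.strong_induction_on with
  | _ n ih =>
    intro vals hlen hne
    match vals with
    | [v] => simp [stBuild, stLeaves, stWF]
    | v :: w :: rest =>
      rw [stBuild]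
      set vals := v :: w :: rest with hv
      set mid := vals.length / 2 with hmid
      have hlen2 : 2 ≤ vals.length := by simp [hv]
      have h1 : 1 ≤ mid := by rw [hmid]; omega
      have h2 : mid < vals.length := by rw [hmid]; omega
      have htl : (vals.take mid).length = mid := by simp; omega
      have hdl : (vals.drop mid).length = vals.length - mid := by simp
      have ihl := ih (vals.take mid).length (by rw [htl]; omega) (vals.take mid) rfl
        (by intro hh; rw [hh] at htl; simp at htl; omega)
      have ihr := ih (vals.drop mid).length (by rw [hdl]; omega) (vals.drop mid) rfl
        (by intro hh; rw [hh] at hdl; simp at hdl; omega)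
      obtain ⟨hl1, hl2⟩ := ihl
      obtain ⟨hr1, hr2⟩ := ihr
      constructor
      · simp only [stLeaves, hl1, hr1]
        rw [← List.map_append, List.take_append_drop]
      · exact ⟨rfl, hl2, hr2⟩

-- the tree pass equals the plain-list pass on the compacted leaves
lemma bMain_eq_specGo (ken : List Int) : ∀ (t : STree) (score : Int), stWF t →
    bMain t ken score = specGo (compact (stLeaves t)) ken score := by
  induction ken with
  | nil => intro t score _; rfl
  | cons k rest ih =>
    intro t score hwf
    rcases stPopGt_spec t k hwf with ⟨hn, heq⟩ | ⟨L', hL, hf, hlv, hwf'⟩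
    · have hrf : remFirstGt (compact (stLeaves t)) k = none := by
        rw [remFirstGt_compact, hn]; rfl
      simp only [bMain, heq, specGo, hrf]
      simp
    · have hrf : remFirstGt (compact (stLeaves t)) k = some (compact L') := by
        rw [remFirstGt_compact, hL]; rfl
      simp only [bMain, hf, if_pos, specGo, hrf]
      rw [ih _ (score + 1) hwf', hlv]

-- ===== A-side lemmas (the two-ended simulation equals the stop-at-first-loss pass) =====

lemma aFirstGtIdx_eq_none_iff (naomi : List Int) (k : Int) :
    aFirstGtIdx naomi k = none ↔ ∀ x ∈ naomi, ¬ k < x := by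
  induction naomi with
  | nil => simp [aFirstGtIdx]
  | cons v vs ih =>
    by_cases h : k < v <;> simp [aFirstGtIdx, h, ih] ;  exact fun _ => not_lt.mp h

lemma remFirstGt_eq_none_iff (remaining : List Int) (k : Int) :
    remFirstGt remaining k = none ↔ ∀ x ∈ remaining, ¬ k < x := by
  induction remaining with
  | nil => simp [remFirstGt]
  | cons v vs ih =>
    by_cases h : k < v <;> simp [remFirstGt, h, ih] ;  exact fun _ => not_lt.mp h

lemma remFirstGt_of_aFirstGtIdx (naomi : List Int) (k : Int) (i : Nat)
    (h : aFirstGtIdx naomi k = some i) :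
    remFirstGt naomi k = some (naomi.take i ++ naomi.drop (i + 1)) := by
  induction naomi generalizing i with
  | nil => simp [aFirstGtIdx] at h
  | cons v vs ih =>
    by_cases hv : k < v
    · simp [aFirstGtIdx, hv] at h
      simp [remFirstGt, hv, ← h]
    · simp [aFirstGtIdx, hv] at h
      obtain ⟨j, hj, rfl⟩ := h
      simp [remFirstGt, hv, ih j hj]

-- the loss phase: once nothing in naomi beats ken's front k, the score is final
lemma deceitfulGo_loss (k : Int) :
    ∀ (rest naomi : List Int) (score : Int), (∀ x ∈ naomi, ¬ k < x) →
      deceitfulGo naomi (k :: rest) score = score := by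
  suffices h : ∀ (n : Nat) (rest : List Int), rest.length = n → ∀ (naomi : List Int) (score : Int),
      (∀ x ∈ naomi, ¬ k < x) → deceitfulGo naomi (k :: rest) score = score by
    intro rest naomi score hno; exact h rest.length rest rfl naomi score hno
  intro n
  induction n using Nat.strong_induction_on with
  | _ n ih =>
    intro rest hlen naomi score hno
    have hnone : aFirstGtIdx naomi k = none := (aFirstGtIdx_eq_none_iff naomi k).mpr hno
    have htail : ∀ x ∈ naomi.tail, ¬ k < x := fun x hx => hno x (List.mem_of_mem_tail hx)
    cases rest with
    | nil =>
      rw [deceitfulGo, hnone]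
      simp [deceitfulGo]
    | cons r rs =>
      rw [deceitfulGo, hnone]
      have hdl : (k :: r :: rs).dropLast = k :: (r :: rs).dropLast := rfl
      rw [hdl, ih (r :: rs).dropLast.length (by simp at hlen ⊢; omega) _ rfl naomi.tail score htail]

lemma deceitfulGo_eq_specGo :
    ∀ (ken naomi : List Int) (score : Int), deceitfulGo naomi ken score = specGo naomi ken score := by
  intro ken
  induction ken with
  | nil => intro naomi score; rw [deceitfulGo]; rfl
  | cons kb krest ih =>
    intro naomi score
    cases h : aFirstGtIdx naomi kb with
    | none =>
      have hno := (aFirstGtIdx_eq_none_iff naomi kb).mp h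
      have hb : remFirstGt naomi kb = none := (remFirstGt_eq_none_iff naomi kb).mpr hno
      rw [deceitfulGo_loss kb krest naomi score hno]
      simp [specGo, hb]
    | some i =>
      have hb := remFirstGt_of_aFirstGtIdx naomi kb i h
      rw [deceitfulGo, h]
      simp only [specGo, hb]
      exact ih _ _

lemma specGo_nil (ken : List Int) (score : Int) : specGo [] ken score = score := by
  cases ken <;> simp [specGo, remFirstGt]

-- ===== VERDICT (by name: the statement is the Claim_ definition above) =====
theorem deceitful_spec : Claim_equal_deceitful := by
  intro naomi ken _
  unfold Spec_deceitful deceitful deceitful_alt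
  rw [deceitfulGo_eq_specGo]
  match naomi with
  | [] => exact specGo_nil ken 0
  | v :: vs =>
    obtain ⟨hlv, hwf⟩ := stBuild_spec (v :: vs).length (v :: vs) rfl (by simp)
    rw [bMain_eq_specGo ken _ 0 hwf, hlv, compact_map_some]
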